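-- pv_equiv track=rewrite | github.com/salelkafrawy/remote_sensing | trainer/baseline_PT.py | get_nb_bands
-- ===== SOURCE A (Python) =====
-- def get_nb_bands(bands):
--     """
--     Get number of channels in the satellite input branch
--     (stack bands of satellite + environmental variables)
--     """
--     n = 0
--     for b in bands:
--         if b in ["near_ir", "landuse", "altitude"]:
--             n += 1
--         elif b == "ped":
--             n += 8
--         elif b == "bioclim":
--             n += 19
--         elif b == "rgb":
--             n += 3
--     return n
-- ===== SOURCE B (Python) =====
-- def get_nb_bands(bands):
--     """
--     Get number of channels in the satellite input branch
--     (stack bands of satellite + environmental variables)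
--     """
--     weights = {"near_ir": 1, "landuse": 1, "altitude": 1,
--                "ped": 8, "bioclim": 19, "rgb": 3}
--     return sum(bands.count(name) * w for name, w in weights.items())
-- ===== Notes on version B (the rewrite author's own statement) =====
-- stated objective: alternative
-- what changed: Instead of folding an if/elif chain over the input, B builds a fixed band->channel weight table and sums bands.count(name)*w over the six known band types; unknown names contribute 0 because they are never weight keys.
import Mathlib
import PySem

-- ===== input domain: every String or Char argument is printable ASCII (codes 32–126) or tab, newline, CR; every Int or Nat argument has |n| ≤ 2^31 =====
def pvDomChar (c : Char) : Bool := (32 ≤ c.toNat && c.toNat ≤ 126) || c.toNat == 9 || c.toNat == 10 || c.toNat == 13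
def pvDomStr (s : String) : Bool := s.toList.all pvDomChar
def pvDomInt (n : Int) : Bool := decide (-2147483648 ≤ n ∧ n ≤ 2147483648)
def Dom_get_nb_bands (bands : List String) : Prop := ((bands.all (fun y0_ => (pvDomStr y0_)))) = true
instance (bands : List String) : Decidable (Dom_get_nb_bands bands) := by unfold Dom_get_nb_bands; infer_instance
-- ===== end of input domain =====

-- B replaces A's if/elif fold over the input by a fixed weight table summed with bands.count (alternative decomposition, same cost).


-- ===== PORT A =====
def get_nb_bands (bands : List String) : Int :=
  bands.foldl (fun n b =>
    if b ∈ ["near_ir", "landuse", "altitude"] then n + 1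
    else if b = "ped" then n + 8
    else if b = "bioclim" then n + 19
    else if b = "rgb" then n + 3
    else n) 0

-- ===== PORT B =====
def pvWeights : List (String × Int) :=
  [("near_ir", 1), ("landuse", 1), ("altitude", 1), ("ped", 8), ("bioclim", 19), ("rgb", 3)]

def get_nb_bands_alt (bands : List String) : Int :=
  (pvWeights.map (fun p => (bands.count p.1 : Int) * p.2)).sum

-- ===== PRECONDITION & SPEC =====
def Spec_get_nb_bands (bands : List String) (out : Int) : Prop := out = get_nb_bands_alt bands
instance (bands : List String) (out : Int) : Decidable (Spec_get_nb_bands bands out) := by unfold Spec_get_nb_bands; infer_instance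

-- ===== CLAIM (what is proved, stated in full; the proofs are below) =====
def Claim_equal_get_nb_bands : Prop := ∀ (bands : List String), Dom_get_nb_bands bands → Spec_get_nb_bands bands (get_nb_bands bands)

-- ===== LEMMAS AND PROOFS =====

lemma alt_nil : get_nb_bands_alt [] = 0 := by decide

lemma alt_cons (b : String) (bs : List String) :
    get_nb_bands_alt (b :: bs) =
      get_nb_bands_alt bs +
        (if b ∈ ["near_ir", "landuse", "altitude"] then 1
         else if b = "ped" then 8
         else if b = "bioclim" then 19
         else if b = "rgb" then 3
         else 0) := by
  simp only [get_nb_bands_alt, pvWeights, List.map, List.count_cons, List.sum_cons,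
    List.sum_nil, List.mem_cons]
  push_cast
  split_ifs <;> simp_all <;> ring

lemma foldl_shift (bs : List String) (n : Int) :
    bs.foldl (fun n b =>
      if b ∈ ["near_ir", "landuse", "altitude"] then n + 1
      else if b = "ped" then n + 8
      else if b = "bioclim" then n + 19
      else if b = "rgb" then n + 3
      else n) n = n + get_nb_bands_alt bs := by
  induction bs generalizing n with
  | nil => simp [alt_nil]
  | cons b bs ih =>
    simp only [List.foldl_cons, ih, alt_cons]
    split_ifs <;> ring

-- ===== VERDICT (by name: the statement is the Claim_ definition above) =====
theorem get_nb_bands_spec : Claim_equal_get_nb_bands := by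
  intro bands _
  show get_nb_bands bands = get_nb_bands_alt bands
  simpa [get_nb_bands] using foldl_shift bands 0
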